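-- pv_equiv track=rewrite | github.com/tony102741/firmware_project | src/core/analyzer/scoring.py | score_sinks
-- ===== SOURCE A (Python) =====
-- def score_sinks(sinks_by_tier):
--     """
--     Assign a numeric score based on sink tier and specific function.
--
--     critical: command execution / dynamic loading — highest severity
--     strong:   unchecked memory/string ops
--     weak:     compiler-added checked variants; 1 pt each, only admitted
--               after dataflow confirmation (see analyze_services in risk.py)
--     """
--     score = 0
--
--     for s in sinks_by_tier.get("critical", []):
--         l = s.lower()
--         if "system(" in l or "popen(" in l:
--             score += 8
--         elif "exec" in l:
--             score += 7
--         elif "dlopen(" in l or "dlsym(" in l: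
--             score += 6   # dynamic loading = conditional code execution
--         else:
--             score += 5   # /bin/sh, sh -c
--
--     for s in sinks_by_tier.get("strong", []):
--         l = s.lower()
--         if "gets(" in l:
--             score += 5
--         elif "strcpy(" in l or "strcat(" in l:
--             score += 4
--         elif "sprintf(" in l or "vsprintf(" in l:
--             score += 3
--         elif "printf(" in l:
--             score += 2   # format string risk when arg is user-controlled
--         else:
--             score += 2
--
--     for _ in sinks_by_tier.get("weak", []):
--         score += 1
--
--     return score
-- ===== SOURCE B (Python) =====
-- def score_sinks(sinks_by_tier):
--     crit = {"system(": 8, "popen(": 8, "exec": 7, "dlopen(": 6, "dlsym(": 6}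
--     strong = {"gets(": 5, "strcpy(": 4, "strcat(": 4,
--               "sprintf(": 3, "vsprintf(": 3, "printf(": 2}
--
--     def best(s, weights, base):
--         # weights are chosen so that the most severe matching pattern wins;
--         # a sink matching nothing gets the tier's base score
--         l = s.lower()
--         return max((w for p, w in weights.items() if p in l), default=base)
--
--     return (sum(best(s, crit, 5) for s in sinks_by_tier.get("critical", []))
--             + sum(best(s, strong, 2) for s in sinks_by_tier.get("strong", []))
--             + len(sinks_by_tier.get("weak", [])))
-- ===== Notes on version B (the rewrite author's own statement) =====
-- stated objective: alternative
-- what changed: Replaces A's ordered first-match if/elif ladders with an order-independent rule: each sink scores the maximum weight among all matching patterns (default = tier base), valid because A's ladder weights strictly decrease, summed via map/sum comprehensions instead of accumulator loops.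
import Mathlib
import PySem

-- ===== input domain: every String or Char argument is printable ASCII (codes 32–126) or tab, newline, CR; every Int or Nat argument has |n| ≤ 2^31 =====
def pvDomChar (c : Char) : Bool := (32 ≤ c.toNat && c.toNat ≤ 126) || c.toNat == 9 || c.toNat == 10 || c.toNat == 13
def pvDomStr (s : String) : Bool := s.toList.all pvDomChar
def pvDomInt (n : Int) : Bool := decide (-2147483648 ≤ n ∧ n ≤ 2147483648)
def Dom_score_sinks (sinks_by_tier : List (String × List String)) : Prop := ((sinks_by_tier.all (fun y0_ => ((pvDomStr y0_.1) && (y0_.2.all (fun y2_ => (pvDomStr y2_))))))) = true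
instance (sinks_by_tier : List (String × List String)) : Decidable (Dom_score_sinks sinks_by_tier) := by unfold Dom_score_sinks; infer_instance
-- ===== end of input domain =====

-- B replaces A's ordered first-match if/elif ladders by an order-independent rule:
-- each sink scores the MAXIMUM weight among all matching patterns (default = tier base),
-- correct because A's ladder weights decrease down each chain (objective: alternative).
-- ===== PORT A =====
def score_sinks (sinks_by_tier : List (String × List String)) : Int :=
  let d := PySem.Dict.mk sinks_by_tier
  let score : Int := 0
  let score := (d.getD "critical" []).foldl (fun score s =>
    let l := PySem.Str.lower s
    if PySem.Str.isIn "system(" l || PySem.Str.isIn "popen(" l then score + 8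
    else if PySem.Str.isIn "exec" l then score + 7
    else if PySem.Str.isIn "dlopen(" l || PySem.Str.isIn "dlsym(" l then score + 6
    else score + 5) score
  let score := (d.getD "strong" []).foldl (fun score s =>
    let l := PySem.Str.lower s
    if PySem.Str.isIn "gets(" l then score + 5
    else if PySem.Str.isIn "strcpy(" l || PySem.Str.isIn "strcat(" l then score + 4
    else if PySem.Str.isIn "sprintf(" l || PySem.Str.isIn "vsprintf(" l then score + 3
    else if PySem.Str.isIn "printf(" l then score + 2
    else score + 2) score
  let score := (d.getD "weak" []).foldl (fun score _ => score + 1) score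
  score

-- ===== PORT B =====
-- the crit / strong weight tables of Source B, in dict insertion order
def pvCritW : List (String × Int) :=
  [("system(", 8), ("popen(", 8), ("exec", 7), ("dlopen(", 6), ("dlsym(", 6)]
def pvStrongW : List (String × Int) :=
  [("gets(", 5), ("strcpy(", 4), ("strcat(", 4), ("sprintf(", 3), ("vsprintf(", 3), ("printf(", 2)]

-- best(s, weights, base) = max((w for p, w in weights.items() if p in l), default=base)
def pvBest (weights : List (String × Int)) (base : Int) (s : String) : Int :=
  let l := PySem.Str.lower s
  ((PySem.List.max? ((weights.filter (fun p => PySem.Str.isIn p.1 l)).map Prod.snd)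
      (fun x => x)).getD base)

def score_sinks_alt (sinks_by_tier : List (String × List String)) : Int :=
  let d := PySem.Dict.mk sinks_by_tier
  ((d.getD "critical" []).map (pvBest pvCritW 5)).sum
  + ((d.getD "strong" []).map (pvBest pvStrongW 2)).sum
  + (d.getD "weak" []).length

-- ===== PRECONDITION & SPEC =====
def Spec_score_sinks (sinks_by_tier : List (String × List String)) (out : Int) : Prop := out = score_sinks_alt sinks_by_tier
instance (sinks_by_tier : List (String × List String)) (out : Int) : Decidable (Spec_score_sinks sinks_by_tier out) := by unfold Spec_score_sinks; infer_instance

-- ===== CLAIM =====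
def Claim_equal_score_sinks : Prop := ∀ (sinks_by_tier : List (String × List String)), Dom_score_sinks sinks_by_tier → Spec_score_sinks sinks_by_tier (score_sinks sinks_by_tier)

-- ===== LEMMAS AND PROOFS =====
lemma pvCritStep (t : Int) (s : String) :
    (let l := PySem.Str.lower s
     if PySem.Str.isIn "system(" l || PySem.Str.isIn "popen(" l then t + 8
     else if PySem.Str.isIn "exec" l then t + 7
     else if PySem.Str.isIn "dlopen(" l || PySem.Str.isIn "dlsym(" l then t + 6
     else t + 5)
    = t + pvBest pvCritW 5 s := by
  simp only [pvBest, pvCritW]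
  by_cases h1 : PySem.Str.isIn "system(" (PySem.Str.lower s) <;>
  by_cases h2 : PySem.Str.isIn "popen(" (PySem.Str.lower s) <;>
  by_cases h3 : PySem.Str.isIn "exec" (PySem.Str.lower s) <;>
  by_cases h4 : PySem.Str.isIn "dlopen(" (PySem.Str.lower s) <;>
  by_cases h5 : PySem.Str.isIn "dlsym(" (PySem.Str.lower s) <;>
  simp_all [PySem.Str.isIn, PySem.Str.lower, PySem.List.max?]

lemma pvStrongStep (t : Int) (s : String) :
    (let l := PySem.Str.lower s
     if PySem.Str.isIn "gets(" l then t + 5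
     else if PySem.Str.isIn "strcpy(" l || PySem.Str.isIn "strcat(" l then t + 4
     else if PySem.Str.isIn "sprintf(" l || PySem.Str.isIn "vsprintf(" l then t + 3
     else if PySem.Str.isIn "printf(" l then t + 2
     else t + 2)
    = t + pvBest pvStrongW 2 s := by
  simp only [pvBest, pvStrongW]
  by_cases h1 : PySem.Str.isIn "gets(" (PySem.Str.lower s) <;>
  by_cases h2 : PySem.Str.isIn "strcpy(" (PySem.Str.lower s) <;>
  by_cases h3 : PySem.Str.isIn "strcat(" (PySem.Str.lower s) <;>
  by_cases h4 : PySem.Str.isIn "sprintf(" (PySem.Str.lower s) <;>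
  by_cases h5 : PySem.Str.isIn "vsprintf(" (PySem.Str.lower s) <;>
  by_cases h6 : PySem.Str.isIn "printf(" (PySem.Str.lower s) <;>
  simp_all [PySem.Str.isIn, PySem.Str.lower, PySem.List.max?]

lemma pvFoldAdd (f : String → Int) (l : List String) (t : Int)
    (g : Int → String → Int) (h : ∀ a s, g a s = a + f s) :
    l.foldl g t = t + (l.map f).sum := by
  induction l generalizing t with
  | nil => simp
  | cons x xs ih => simp [List.foldl, h, ih]; ring

lemma pvCritFold (l : List String) (t : Int) :
    l.foldl (fun score s =>
      let l := PySem.Str.lower s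
      if PySem.Str.isIn "system(" l || PySem.Str.isIn "popen(" l then score + 8
      else if PySem.Str.isIn "exec" l then score + 7
      else if PySem.Str.isIn "dlopen(" l || PySem.Str.isIn "dlsym(" l then score + 6
      else score + 5) t = t + (l.map (pvBest pvCritW 5)).sum :=
  pvFoldAdd _ _ _ _ (fun a s => pvCritStep a s)

lemma pvStrongFold (l : List String) (t : Int) :
    l.foldl (fun score s =>
      let l := PySem.Str.lower s
      if PySem.Str.isIn "gets(" l then score + 5
      else if PySem.Str.isIn "strcpy(" l || PySem.Str.isIn "strcat(" l then score + 4
      else if PySem.Str.isIn "sprintf(" l || PySem.Str.isIn "vsprintf(" l then score + 3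
      else if PySem.Str.isIn "printf(" l then score + 2
      else score + 2) t = t + (l.map (pvBest pvStrongW 2)).sum :=
  pvFoldAdd _ _ _ _ (fun a s => pvStrongStep a s)

lemma pvWeakFold (l : List String) (t : Int) :
    l.foldl (fun score _ => score + 1) t = t + l.length := by
  induction l generalizing t with
  | nil => simp
  | cons x xs ih => simp [List.foldl, ih]; omega

-- ===== VERDICT =====
theorem score_sinks_spec : Claim_equal_score_sinks := by
  intro d _
  unfold Spec_score_sinks score_sinks score_sinks_alt
  simp only [pvCritFold, pvStrongFold, pvWeakFold]
  ring
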